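-- pv_equiv track=rewrite | github.com/IvanKalug-QA/codewars |  Yoga_Class.py | yoga
-- ===== SOURCE A (Python) =====
-- def yoga(classroom, poses):
--     total_poses_completed = 0
--     row_sums = []
--     for row in classroom:
--         row_sums.append(sum(row))
--     for i in range(len(classroom)):
--         row_sum = row_sums[i]
--         for person_skill in classroom[i]:
--             for pose in poses:
--                 if row_sum + person_skill >= pose:
--                     total_poses_completed += 1
--     return total_poses_completed
-- ===== SOURCE B (Python) =====
-- def _bisect_right(a, x):
--     lo, hi = 0, len(a)
--     while lo < hi:
--         mid = (lo + hi) // 2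
--         if x < a[mid]:
--             hi = mid
--         else:
--             lo = mid + 1
--     return lo
--
--
-- def yoga(classroom, poses):
--     sorted_poses = sorted(poses)
--     total = 0
--     for row in classroom:
--         base = sum(row)
--         for skill in row:
--             total += _bisect_right(sorted_poses, base + skill)
--     return total
-- ===== Notes on version B (the rewrite author's own statement) =====
-- stated objective: faster
-- what changed: Replaces the inner linear scan over all poses per person by sorting the poses once and counting completable poses with a hand-written binary search (bisect_right) per person.
import Mathlib
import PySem

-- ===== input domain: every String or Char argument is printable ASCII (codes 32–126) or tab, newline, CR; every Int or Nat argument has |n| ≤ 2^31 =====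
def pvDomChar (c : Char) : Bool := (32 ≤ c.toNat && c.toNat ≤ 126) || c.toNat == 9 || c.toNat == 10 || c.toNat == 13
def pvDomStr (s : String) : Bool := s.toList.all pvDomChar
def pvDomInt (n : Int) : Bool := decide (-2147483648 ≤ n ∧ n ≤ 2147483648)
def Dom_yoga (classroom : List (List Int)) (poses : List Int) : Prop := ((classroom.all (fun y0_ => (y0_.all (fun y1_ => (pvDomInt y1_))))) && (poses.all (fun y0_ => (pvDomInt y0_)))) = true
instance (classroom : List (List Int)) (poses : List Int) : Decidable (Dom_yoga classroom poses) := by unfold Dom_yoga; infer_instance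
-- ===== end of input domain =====

-- B sorts the poses once and counts completable poses with a hand-written binary search per person
-- instead of A's inner linear scan over all poses (objective: faster; asymptotic change).


-- ===== PORT A =====
def yoga (classroom : List (List Int)) (poses : List Int) : Int :=
  let total0 : Int := 0
  let row_sums : List Int := classroom.foldl (fun acc row => acc ++ [row.sum]) []
  (PySem.List.pyRange 0 (PySem.List.len classroom) 1).foldl (fun total i =>
    let row_sum := PySem.List.pyGetD row_sums i 0
    (PySem.List.pyGetD classroom i []).foldl (fun t person_skill =>
      poses.foldl (fun t2 pose => if row_sum + person_skill ≥ pose then t2 + 1 else t2) t)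
      total) total0

-- ===== PORT B =====
-- transliteration of Source B's hand-written _bisect_right loop (recursion on hi - lo)
def bisectRightGo (a : List Int) (x : Int) (lo hi : Nat) : Nat :=
  if _h : lo < hi then
    if x < a.getD ((lo + hi) / 2) 0 then bisectRightGo a x lo ((lo + hi) / 2)
    else bisectRightGo a x ((lo + hi) / 2 + 1) hi
  else lo
termination_by hi - lo
decreasing_by all_goals omega

def bisectRightB (a : List Int) (x : Int) : Nat := bisectRightGo a x 0 a.length

def yoga_alt (classroom : List (List Int)) (poses : List Int) : Int :=
  let sorted_poses := PySem.List.sorted poses (fun p => p) false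
  classroom.foldl (fun total row =>
    let base := row.sum
    row.foldl (fun t skill => t + (bisectRightB sorted_poses (base + skill) : Int)) total) 0

-- ===== PRECONDITION & SPEC =====
def Spec_yoga (classroom : List (List Int)) (poses : List Int) (out : Int) : Prop := out = yoga_alt classroom poses
instance (classroom : List (List Int)) (poses : List Int) (out : Int) : Decidable (Spec_yoga classroom poses out) := by unfold Spec_yoga; infer_instance

-- ===== CLAIM (what is proved, stated in full; the proofs are below) =====
def Claim_equal_yoga : Prop := ∀ (classroom : List (List Int)) (poses : List Int), Dom_yoga classroom poses → Spec_yoga classroom poses (yoga classroom poses)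

-- ===== LEMMAS AND PROOFS =====

-- on a list where the elements ≤ x are exactly the first r, countP (· ≤ x) is r
lemma countP_eq_of_prefix (x : Int) : ∀ (a : List Int) (r : Nat), r ≤ a.length →
    (∀ j (h : j < a.length), j < r ↔ a[j] ≤ x) →
    a.countP (fun p => decide (p ≤ x)) = r := by
  intro a
  induction a with
  | nil => intro r hr _; simp only [List.length_nil] at hr; simp [Nat.le_zero.mp hr]
  | cons b t ih =>
    intro r hr hch
    cases r with
    | zero =>
      have hb : ¬ b ≤ x := by
        have := (hch 0 (by simp)).symm
        simpa using fun h => Nat.not_lt_zero 0 (this.mp h)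
      have ht : t.countP (fun p => decide (p ≤ x)) = 0 := by
        apply ih 0 (Nat.zero_le _)
        intro j hj
        constructor
        · intro h; exact absurd h (Nat.not_lt_zero j)
        · intro h
          exact absurd ((hch (j+1) (by simpa using Nat.succ_lt_succ hj)).mpr (by simpa using h))
            (Nat.not_lt_zero _)
      simp [hb, ht]
    | succ s =>
      have hb : b ≤ x := (hch 0 (by simp)).mp (Nat.succ_pos s)
      have ht : t.countP (fun p => decide (p ≤ x)) = s := by
        apply ih s (by simpa using Nat.succ_le_succ_iff.mp hr)
        intro j hj
        have := hch (j+1) (by simpa using Nat.succ_lt_succ hj)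
        simpa [Nat.succ_lt_succ_iff] using this
      simp [hb, ht]

-- correctness of the binary-search loop on a sorted list
lemma bisectRightGo_eq (a : List Int) (x : Int)
    (hs : a.Pairwise (fun p q => p ≤ q)) :
    ∀ n lo hi, hi - lo ≤ n → lo ≤ hi → hi ≤ a.length →
    (∀ j (h : j < a.length), j < lo → a[j] ≤ x) →
    (∀ j (h : j < a.length), hi ≤ j → x < a[j]) →
    bisectRightGo a x lo hi = a.countP (fun p => decide (p ≤ x)) := by
  have hmono : ∀ i j (hi : i < a.length) (hj : j < a.length), i ≤ j → a[i] ≤ a[j] := by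
    intro i j hi hj hij
    rcases Nat.lt_or_ge i j with h | h
    · exact (List.pairwise_iff_getElem.mp hs) i j hi hj h
    · have : i = j := Nat.le_antisymm hij h
      subst this; exact le_refl _
  intro n
  induction n with
  | zero =>
    intro lo hi hn hlh hha hlow hhigh
    have heq : lo = hi := by omega
    subst heq
    rw [bisectRightGo, dif_neg (lt_irrefl lo)]
    refine (countP_eq_of_prefix x a lo (le_trans hlh hha) ?_).symm
    intro j hj
    constructor
    · exact fun h => hlow j hj h
    · intro h
      by_contra hc
      exact absurd h (not_le.mpr (hhigh j hj (Nat.le_of_not_lt hc)))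
  | succ n ih =>
    intro lo hi hn hlh hha hlow hhigh
    by_cases h : lo < hi
    · rw [bisectRightGo, dif_pos h]
      have hmid1 : lo ≤ (lo + hi) / 2 := by omega
      have hmid2 : (lo + hi) / 2 < hi := by omega
      have hmlen : (lo + hi) / 2 < a.length := lt_of_lt_of_le hmid2 hha
      have hget : a.getD ((lo + hi) / 2) 0 = a[(lo + hi) / 2] := List.getD_eq_getElem a 0 hmlen
      by_cases hx : x < a.getD ((lo + hi) / 2) 0
      · rw [if_pos hx]
        apply ih lo ((lo + hi) / 2) (by omega) hmid1 (le_of_lt hmlen) hlow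
        intro j hj hmj
        exact lt_of_lt_of_le (hget ▸ hx) (hmono _ _ hmlen hj hmj)
      · rw [if_neg hx]
        apply ih ((lo + hi) / 2 + 1) hi (by omega) (by omega) hha
        · intro j hj hjm
          exact le_trans (hmono _ _ hj hmlen (by omega)) (hget ▸ not_lt.mp hx)
        · exact hhigh
    · exact ih lo hi (by omega) hlh hha hlow hhigh

lemma bisectRightB_eq (a : List Int) (x : Int) (hs : a.Pairwise (fun p q => p ≤ q)) :
    bisectRightB a x = a.countP (fun p => decide (p ≤ x)) := by
  apply bisectRightGo_eq a x hs a.length 0 a.length (by omega) (Nat.zero_le _) (le_refl _)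
  · intro j _ h; exact absurd h (Nat.not_lt_zero j)
  · intro j hj h; exact absurd hj (not_lt.mpr h)

-- per-person agreement: counting poses with the scan = the binary search on the sorted poses
lemma person_count (poses : List Int) (v t : Int) :
    poses.foldl (fun t2 pose => if v ≥ pose then t2 + 1 else t2) t
      = t + (bisectRightB (PySem.List.sorted poses (fun p => p) false) v : Int) := by
  have hsorted : (PySem.List.sorted poses (fun p => p) false).Pairwise (fun p q => p ≤ q) := by
    simpa using PySem.List.sorted_pairwise poses (fun p => p)
  rw [bisectRightB_eq _ v hsorted,
      (PySem.List.sorted_perm poses (fun p => p) false).countP_eq (fun p => decide (p ≤ v))]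
  have := PySem.List.foldl_count_if (fun pose => decide (pose ≤ v)) poses t
  simpa [ge_iff_le] using this

-- ===== VERDICT (by name: the statement is the Claim_ definition above) =====
theorem yoga_spec : Claim_equal_yoga := by
  intro classroom poses _
  show yoga classroom poses = yoga_alt classroom poses
  unfold yoga yoga_alt
  rw [PySem.List.foldl_append_singleton_eq_map List.sum classroom []]
  simp only [List.nil_append]
  refine Eq.trans (List.foldl_ext _ _ _ ?_)
    (PySem.List.foldl_pyRange_zero_pyGetD classroom []
      (fun total (row : List Int) =>
        row.foldl (fun t skill =>
          t + (bisectRightB (PySem.List.sorted poses (fun p => p) false) (row.sum + skill) : Int))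
          total) 0)
  intro total i _
  have hsum : PySem.List.pyGetD (classroom.map List.sum) i 0
      = (PySem.List.pyGetD classroom i []).sum := by
    simpa using PySem.List.pyGetD_map List.sum classroom i []
  simp only [hsum]
  apply List.foldl_ext
  intro t skill _
  exact person_count poses ((PySem.List.pyGetD classroom i []).sum + skill) t
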